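-- pv_equiv track=rewrite | github.com/thierryxdp/TCC | problems/812/solution_265662.py | retira_pontuacao
-- ===== SOURCE A (Python) =====
-- def retira_pontuacao(frase):
--     """"Função que dada uma frase, retorna uma nova frase com toda a pontuação subistituida por " ".
--     casos de teste:
--     entrada:"Era uma vez, e assim se fez." saida:"Era uma vez  e assim se fez "
--     entrada:"Vá embora, agora!" saida:"Va embora  agora "
--     entrada:"Vou-lhe dar uma segunda chance, mas será a última." saida "Vou lhe dar uma segunda chance  mas sera a última "
--     assinatura: str -> str"""
--     a='-'
--     b=','
--     c=':'
--     d=';'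
--     e='.'
--     f='?'
--     g='!'
--     h='...'
--     for i in a:
--         z=frase.replace(a,' ')
--     for i in b:
--         y=z.replace(b,' ')
--     for i in c:
--         fra=y.replace(c,' ')
--     for i in d:
--         fras=fra.replace(d,' ')
--     for i in e:
--         fras1=fras.replace(e,' ')
--     for i in f:
--         fras2=fras1.replace(f,' ')
--     for i in g:
--         fras3=fras2.replace(g,' ')
--     for i in h:
--         fras4=fras3.replace(h,' ')
--     return fras4
-- ===== SOURCE B (Python) =====
-- def retira_pontuacao(frase):
--     pont = {'-', ',', ':', ';', '.', '?', '!'}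
--     return ''.join(' ' if ch in pont else ch for ch in frase)
-- ===== Notes on version B (the rewrite author's own statement) =====
-- stated objective: idiomatic
-- what changed: One single pass over the characters with a punctuation set and a join, instead of eight sequential whole-string .replace scans (incl. the no-op '...' replace) wrapped in pointless single-iteration for-loops.
import Mathlib
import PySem

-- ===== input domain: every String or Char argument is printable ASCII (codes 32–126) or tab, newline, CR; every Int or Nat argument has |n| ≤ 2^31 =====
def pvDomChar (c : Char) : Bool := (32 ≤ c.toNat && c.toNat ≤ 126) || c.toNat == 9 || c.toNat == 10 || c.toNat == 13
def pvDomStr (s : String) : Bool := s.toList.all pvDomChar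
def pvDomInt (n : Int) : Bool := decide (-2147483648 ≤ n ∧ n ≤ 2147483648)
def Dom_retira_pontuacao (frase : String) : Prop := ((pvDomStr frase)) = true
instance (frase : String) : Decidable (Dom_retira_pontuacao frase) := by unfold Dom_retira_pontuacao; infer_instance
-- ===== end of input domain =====

-- B replaces A's eight sequential .replace scans with one single-pass character map over a punctuation set (idiomatic, same result).


-- ===== PORT A =====
-- each 'for i in <constant string>' loop reassigns the same value on every iteration
-- (the body does not use the loop variable), so each loop is one assignment.
def retira_pontuacao (frase : String) : String :=
  let z := PySem.Str.replace frase "-" " "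
  let y := PySem.Str.replace z "," " "
  let fra := PySem.Str.replace y ":" " "
  let fras := PySem.Str.replace fra ";" " "
  let fras1 := PySem.Str.replace fras "." " "
  let fras2 := PySem.Str.replace fras1 "?" " "
  let fras3 := PySem.Str.replace fras2 "!" " "
  let fras4 := PySem.Str.replace fras3 "..." " "
  fras4

-- ===== PORT B =====
-- ''.join(' ' if ch in pont else ch for ch in frase): a join of one-character pieces
-- is exactly String.ofList of the mapped character list.
def retira_pontuacao_alt (frase : String) : String :=
  String.ofList (frase.toList.map (fun ch =>
    if ch ∈ (['-', ',', ':', ';', '.', '?', '!'] : List Char) then ' ' else ch))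

-- ===== PRECONDITION & SPEC =====
def Spec_retira_pontuacao (frase : String) (out : String) : Prop := out = retira_pontuacao_alt frase
instance (frase : String) (out : String) : Decidable (Spec_retira_pontuacao frase out) := by unfold Spec_retira_pontuacao; infer_instance

-- ===== CLAIM (what is proved, stated in full; the proofs are below) =====
def Claim_equal_retira_pontuacao : Prop := ∀ (frase : String), Dom_retira_pontuacao frase → Spec_retira_pontuacao frase (retira_pontuacao frase)

-- ===== LEMMAS AND PROOFS =====

-- replacing a single character p by ' ' is a pointwise map
def pvSub (p c : Char) : Char := if c = p then ' ' else c

theorem go_single (p : Char) : ∀ (l acc : List Char) (fuel : Nat), l.length ≤ fuel →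
    PySem.Chars.replace.go [p] [' '] fuel l acc = acc.reverse ++ l.map (pvSub p) := by
  intro l
  induction l with
  | nil =>
    intro acc fuel _
    cases fuel <;> simp [PySem.Chars.replace.go]
  | cons c t ih =>
    intro acc fuel h
    cases fuel with
    | zero => simp at h
    | succ n =>
      rw [PySem.Chars.replace.go]
      have hp : ([p].isPrefixOf (c :: t) : Bool) = (p == c) := by simp [List.isPrefixOf]
      rw [hp]
      by_cases hc : p = c
      · subst hc
        simp only [beq_self_eq_true, if_true, List.length_singleton, List.drop_succ_cons,
          List.drop_zero, List.reverse_singleton, List.singleton_append]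
        rw [ih (' ' :: acc) n (by simpa using Nat.le_of_succ_le_succ h)]
        simp [pvSub]
      · rw [beq_false_of_ne hc, if_neg Bool.false_ne_true]
        rw [ih (c :: acc) n (by simpa using Nat.le_of_succ_le_succ h)]
        simp [pvSub, Ne.symm hc]

-- single-character replace as a map
theorem replace_single (s : List Char) (p : Char) :
    PySem.Chars.replace s [p] [' '] = s.map (pvSub p) := by
  simp only [PySem.Chars.replace, List.isEmpty_cons, if_neg Bool.false_ne_true]
  simpa using go_single p s [] s.length le_rfl

-- replace is the identity when the first pattern character does not occur
theorem go_notmem (d : Char) (ds new : List Char) : ∀ (l acc : List Char) (fuel : Nat),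
    d ∉ l → PySem.Chars.replace.go (d :: ds) new fuel l acc = acc.reverse ++ l := by
  intro l
  induction l with
  | nil =>
    intro acc fuel _
    cases fuel <;> simp [PySem.Chars.replace.go]
  | cons c t ih =>
    intro acc fuel hmem
    cases fuel with
    | zero => rw [PySem.Chars.replace.go]
    | succ n =>
      rw [PySem.Chars.replace.go]
      have hne : d ≠ c := fun h => hmem (h ▸ List.mem_cons_self ..)
      have hp : ((d :: ds).isPrefixOf (c :: t) : Bool) = false := by
        simp [List.isPrefixOf, beq_false_of_ne hne]
      rw [hp, if_neg Bool.false_ne_true]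
      rw [ih (c :: acc) n (fun h => hmem (List.mem_cons_of_mem _ h))]
      simp

theorem replace_notmem (s : List Char) (d : Char) (ds new : List Char) (h : d ∉ s) :
    PySem.Chars.replace s (d :: ds) new = s := by
  simp only [PySem.Chars.replace, List.isEmpty_cons, if_neg Bool.false_ne_true]
  simpa using go_notmem d ds new s [] s.length h

theorem retira_pontuacao_spec : Claim_equal_retira_pontuacao := by
  intro frase _
  unfold Spec_retira_pontuacao retira_pontuacao retira_pontuacao_alt
  simp only [PySem.Str.replace, String.toList_ofList]
  simp only [show "-".toList = ['-'] from rfl, show ",".toList = [','] from rfl,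
    show ":".toList = [':'] from rfl, show ";".toList = [';'] from rfl,
    show ".".toList = ['.'] from rfl, show "?".toList = ['?'] from rfl,
    show "!".toList = ['!'] from rfl, show " ".toList = [' '] from rfl,
    show "...".toList = ['.', '.', '.'] from rfl]
  rw [replace_single, replace_single, replace_single, replace_single, replace_single,
    replace_single, replace_single]
  simp only [List.map_map]
  have hcomp : (pvSub '!' ∘ pvSub '?' ∘ pvSub '.' ∘ pvSub ';' ∘ pvSub ':' ∘ pvSub ',' ∘ pvSub '-')
      = (fun ch => if ch ∈ (['-', ',', ':', ';', '.', '?', '!'] : List Char) then ' ' else ch) := by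
    funext c
    by_cases h : c ∈ (['-', ',', ':', ';', '.', '?', '!'] : List Char)
    · fin_cases h <;> rfl
    · simp only [List.mem_cons, List.not_mem_nil, or_false, not_or] at h
      obtain ⟨h1, h2, h3, h4, h5, h6, h7⟩ := h
      simp [pvSub, h1, h2, h3, h4, h5, h6, h7]
  rw [hcomp]
  have hnd : '.' ∉ (frase.toList.map
      (fun ch => if ch ∈ (['-', ',', ':', ';', '.', '?', '!'] : List Char) then ' ' else ch)) := by
    intro hmem
    obtain ⟨c, _, hc⟩ := List.mem_map.mp hmem
    by_cases h : c ∈ (['-', ',', ':', ';', '.', '?', '!'] : List Char)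
    · rw [if_pos h] at hc; exact absurd hc (by decide)
    · rw [if_neg h] at hc; subst hc; exact h (by decide)
  rw [replace_notmem _ _ _ _ hnd]
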